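-- pv_equiv track=rewrite | github.com/ratiertm/hwpx-skill | pyhwpxlib/hwp2hwpx.py | _group_paragraphs
-- ===== SOURCE A (Python) =====
-- from typing import Any, Dict, List, Optional, Tuple
--
-- _TAG_PARA_HEADER = 66       # 16 + 50
--
-- def _group_paragraphs(records: List[dict]) -> List[List[dict]]:
--     """Group records into paragraph groups (PARA_HEADER starts each group).
--
--     Only top-level PARA_HEADER records (at the minimum level found) start new
--     groups.  Deeper PARA_HEADERs (e.g. inside table cells) are kept inside the
--     current group so that the table builder can process them.
--     """
--     if not records:
--         return []
--
--     # Determine the minimum level of PARA_HEADER records in this section.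
--     min_level = None
--     for rec in records:
--         if rec['tag'] == _TAG_PARA_HEADER:
--             lvl = rec.get('level', 0)
--             if min_level is None or lvl < min_level:
--                 min_level = lvl
--     if min_level is None:
--         return [records]
--
--     groups: List[List[dict]] = []
--     current: List[dict] = []
--     for rec in records:
--         if rec['tag'] == _TAG_PARA_HEADER and rec.get('level', 0) == min_level:
--             if current:
--                 groups.append(current)
--             current = [rec]
--         else:
--             current.append(rec)
--     if current:
--         groups.append(current)
--     return groups
-- ===== SOURCE B (Python) =====
-- from typing import Any, Dict, List, Optional, Tuple
--
-- _TAG_PARA_HEADER = 66       # 16 + 50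
--
--
-- def _group_paragraphs(records: List[dict]) -> List[List[dict]]:
--     """Group records into paragraph groups (PARA_HEADER starts each group).
--
--     Right-to-left pass: walk the records back to front, closing a group each
--     time a top-level PARA_HEADER is met, then reverse the collected groups.
--     """
--     if not records:
--         return []
--     levels = [rec.get('level', 0) for rec in records
--               if rec['tag'] == _TAG_PARA_HEADER]
--     if not levels:
--         return [records]
--     m = min(levels)
--     open_rev: List[dict] = []     # records after the last boundary seen, reversed
--     rev_groups: List[List[dict]] = []
--     for rec in reversed(records):
--         if rec['tag'] == _TAG_PARA_HEADER and rec.get('level', 0) == m: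
--             rev_groups.append([rec] + open_rev[::-1])
--             open_rev = []
--         else:
--             open_rev.append(rec)
--     groups = rev_groups[::-1]
--     if open_rev:
--         groups = [open_rev[::-1]] + groups
--     return groups
-- ===== Notes on version B (the rewrite author's own statement) =====
-- stated objective: alternative
-- what changed: Replaces A's forward accumulator loop (current list flushed into groups at each boundary, plus an Option-typed running-minimum loop) with a right-to-left pass that closes a group whenever a top-level PARA_HEADER is met and reverses the collected groups at the end, with min_level taken as min() of a comprehension.
import Mathlib
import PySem

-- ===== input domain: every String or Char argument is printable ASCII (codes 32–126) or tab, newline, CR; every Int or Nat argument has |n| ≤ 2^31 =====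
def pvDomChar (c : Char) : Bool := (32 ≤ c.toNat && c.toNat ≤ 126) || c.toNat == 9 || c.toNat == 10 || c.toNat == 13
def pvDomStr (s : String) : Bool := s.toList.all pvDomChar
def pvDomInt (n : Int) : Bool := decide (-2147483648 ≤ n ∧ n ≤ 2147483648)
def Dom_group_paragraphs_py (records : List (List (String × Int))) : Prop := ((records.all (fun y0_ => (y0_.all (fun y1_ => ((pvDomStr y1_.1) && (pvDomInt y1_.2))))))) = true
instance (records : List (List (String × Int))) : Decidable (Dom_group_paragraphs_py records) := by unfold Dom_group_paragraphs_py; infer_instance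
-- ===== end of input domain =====

-- B groups the records by a right-to-left pass instead of A's forward accumulator; same O(n) cost, no speed claim.

-- record field access shared by both Pythons: rec['tag'] (raises if absent, see Pre_) and rec.get('level', 0)
def pvTag (rec : List (String × Int)) : Option Int := (PySem.Dict.mk rec).get? "tag"
def pvLvl (rec : List (String × Int)) : Int := (PySem.Dict.mk rec).getD "level" 0

-- ===== PORT A =====
def group_paragraphs_py (records : List (List (String × Int))) : List (List (List (String × Int))) :=
  if records = [] then []
  else
    let min_level : Option Int := records.foldl (fun ml rec =>
      if pvTag rec == some 66 then
        let lvl := pvLvl rec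
        match ml with
        | none => some lvl
        | some m0 => if lvl < m0 then some lvl else ml
      else ml) none
    match min_level with
    | none => [records]
    | some m =>
      let st := records.foldl
        (fun (st : List (List (List (String × Int))) × List (List (String × Int))) rec =>
          if pvTag rec == some 66 && pvLvl rec == m then
            ((if st.2 = [] then st.1 else st.1 ++ [st.2]), [rec])
          else (st.1, st.2 ++ [rec])) ([], [])
      if st.2 = [] then st.1 else st.1 ++ [st.2]

-- ===== PORT B =====
def group_paragraphs_py_alt (records : List (List (String × Int))) : List (List (List (String × Int))) :=
  if records = [] then []
  else
    let levels := (records.filter (fun rec => pvTag rec == some 66)).map pvLvl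
    if levels = [] then [records]
    else
      let m := (PySem.List.min? levels (fun x => x)).getD 0
      let st := records.reverse.foldl
        (fun (st : List (List (String × Int)) × List (List (List (String × Int)))) rec =>
          if pvTag rec == some 66 && pvLvl rec == m then
            ([], st.2 ++ [[rec] ++ st.1.reverse])
          else (st.1 ++ [rec], st.2)) ([], [])
      let groups := st.2.reverse
      if st.1 = [] then groups else st.1.reverse :: groups

-- ===== PRECONDITION & SPEC =====
-- Pre_ excludes exactly the records lacking a 'tag' key, on which the Python A raises KeyError.
def Pre_group_paragraphs_py (records : List (List (String × Int))) : Prop :=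
  ∀ rec ∈ records, (PySem.Dict.mk rec).contains "tag" = true
instance (records : List (List (String × Int))) : Decidable (Pre_group_paragraphs_py records) := by unfold Pre_group_paragraphs_py; infer_instance
def pvWitness_group_paragraphs_py : (List (List (String × Int))) :=
  [[("tag", 66), ("level", 1)], [("tag", 67)], [("tag", 66)]]

def Spec_group_paragraphs_py (records : List (List (String × Int))) (out : List (List (List (String × Int)))) : Prop := out = group_paragraphs_py_alt records
instance (records : List (List (String × Int))) (out : List (List (List (String × Int)))) : Decidable (Spec_group_paragraphs_py records out) := by unfold Spec_group_paragraphs_py; infer_instance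

-- ===== CLAIM (what is proved, stated in full; the proofs are below) =====
def Claim_equal_group_paragraphs_py : Prop := ∀ (records : List (List (String × Int))), Dom_group_paragraphs_py records → Pre_group_paragraphs_py records → Spec_group_paragraphs_py records (group_paragraphs_py records)

-- ===== LEMMAS AND PROOFS =====

-- A's running-minimum loop, started from `some c`, computes the fold of `min` over the levels list.
theorem pv_minfold_some (xs : List (List (String × Int))) : ∀ (c : Int),
    xs.foldl (fun ml rec =>
      if pvTag rec == some 66 then
        let lvl := pvLvl rec
        match ml with
        | none => some lvl
        | some m0 => if lvl < m0 then some lvl else ml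
      else ml) (some c)
    = some (((xs.filter (fun rec => pvTag rec == some 66)).map pvLvl).foldl min c) := by
  induction xs with
  | nil => intro c; rfl
  | cons r t ih =>
    intro c
    by_cases h : (pvTag r == some 66) = true
    · simp only [List.foldl_cons, List.filter_cons, h, if_pos, List.map_cons]
      rw [show (if pvLvl r < c then some (pvLvl r) else some c) = some (min c (pvLvl r)) by
        by_cases hc : pvLvl r < c
        · simp [hc, min_def]
        · simp [hc, min_def]]
      exact ih (min c (pvLvl r))
    · simp only [List.foldl_cons, List.filter_cons, h, Bool.false_eq_true]
      exact ih c

-- A's running-minimum loop from `none` agrees with min? of the levels list.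
theorem pv_minfold (xs : List (List (String × Int))) :
    xs.foldl (fun ml rec =>
      if pvTag rec == some 66 then
        let lvl := pvLvl rec
        match ml with
        | none => some lvl
        | some m0 => if lvl < m0 then some lvl else ml
      else ml) none
    = PySem.List.min? ((xs.filter (fun rec => pvTag rec == some 66)).map pvLvl) (fun x => x) := by
  induction xs with
  | nil => rfl
  | cons r t ih =>
    by_cases h : (pvTag r == some 66) = true
    · simp only [List.foldl_cons, List.filter_cons, h, if_pos, List.map_cons]
      rw [PySem.List.min?_id_cons, pv_minfold_some]
    · simp only [List.foldl_cons, List.filter_cons, h, Bool.false_eq_true, if_false]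
      exact ih

-- Core equivalence of the two grouping loops, for any boundary predicate p:
-- A's forward accumulator (groups, current), finished by flushing `current`, equals
-- B's right-fold (open_rev, rev_groups) composed the B way, with A's start state prepended.
theorem pv_loop (p : List (String × Int) → Bool) (xs : List (List (String × Int))) :
    ∀ (G : List (List (List (String × Int)))) (C : List (List (String × Int))),
    (let st := xs.foldl
        (fun (st : List (List (List (String × Int))) × List (List (String × Int))) rec =>
          if p rec then
            ((if st.2 = [] then st.1 else st.1 ++ [st.2]), [rec])
          else (st.1, st.2 ++ [rec])) (G, C);
      if st.2 = [] then st.1 else st.1 ++ [st.2])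
    = (let sb := xs.foldr
        (fun rec (st : List (List (String × Int)) × List (List (List (String × Int)))) =>
          if p rec then
            (([] : List (List (String × Int))), st.2 ++ [[rec] ++ st.1.reverse])
          else (st.1 ++ [rec], st.2)) ([], []);
      G ++ (if C ++ sb.1.reverse = [] then [] else [C ++ sb.1.reverse]) ++ sb.2.reverse) := by
  induction xs with
  | nil =>
    intro G C
    by_cases hC : C = [] <;> simp [hC]
  | cons r t ih =>
    intro G C
    by_cases h : p r = true
    · simp only [List.foldl_cons, List.foldr_cons, h, if_pos]
      rw [ih]
      by_cases hC : C = [] <;>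
        simp [hC, List.append_assoc]
    · simp only [List.foldl_cons, List.foldr_cons, h, Bool.false_eq_true, if_false]
      rw [ih]
      simp [List.append_assoc]


-- The two grouping passes (A forward with accumulator; B over the reversed list) agree, for any p.
theorem pv_main (p : List (String × Int) → Bool) (records : List (List (String × Int))) :
    (if (records.foldl
        (fun (st : List (List (List (String × Int))) × List (List (String × Int))) rec =>
          if p rec then
            ((if st.2 = [] then st.1 else st.1 ++ [st.2]), [rec])
          else (st.1, st.2 ++ [rec])) ([], [])).2 = []
      then (records.foldl
        (fun (st : List (List (List (String × Int))) × List (List (String × Int))) rec =>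
          if p rec then
            ((if st.2 = [] then st.1 else st.1 ++ [st.2]), [rec])
          else (st.1, st.2 ++ [rec])) ([], [])).1
      else (records.foldl
        (fun (st : List (List (List (String × Int))) × List (List (String × Int))) rec =>
          if p rec then
            ((if st.2 = [] then st.1 else st.1 ++ [st.2]), [rec])
          else (st.1, st.2 ++ [rec])) ([], [])).1
        ++ [(records.foldl
        (fun (st : List (List (List (String × Int))) × List (List (String × Int))) rec =>
          if p rec then
            ((if st.2 = [] then st.1 else st.1 ++ [st.2]), [rec])
          else (st.1, st.2 ++ [rec])) ([], [])).2])
    =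
    (if (records.reverse.foldl
        (fun (st : List (List (String × Int)) × List (List (List (String × Int)))) rec =>
          if p rec then
            (([] : List (List (String × Int))), st.2 ++ [[rec] ++ st.1.reverse])
          else (st.1 ++ [rec], st.2)) ([], [])).1 = []
      then (records.reverse.foldl
        (fun (st : List (List (String × Int)) × List (List (List (String × Int)))) rec =>
          if p rec then
            (([] : List (List (String × Int))), st.2 ++ [[rec] ++ st.1.reverse])
          else (st.1 ++ [rec], st.2)) ([], [])).2.reverse
      else (records.reverse.foldl
        (fun (st : List (List (String × Int)) × List (List (List (String × Int)))) rec =>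
          if p rec then
            (([] : List (List (String × Int))), st.2 ++ [[rec] ++ st.1.reverse])
          else (st.1 ++ [rec], st.2)) ([], [])).1.reverse
        :: (records.reverse.foldl
        (fun (st : List (List (String × Int)) × List (List (List (String × Int)))) rec =>
          if p rec then
            (([] : List (List (String × Int))), st.2 ++ [[rec] ++ st.1.reverse])
          else (st.1 ++ [rec], st.2)) ([], [])).2.reverse) := by
  rw [List.foldl_reverse]
  have h := pv_loop p records [] []
  simp only [List.nil_append] at h
  rw [h]
  rcases hfo : records.foldr
      (fun rec (st : List (List (String × Int)) × List (List (List (String × Int)))) =>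
        if p rec then
          (([] : List (List (String × Int))), st.2 ++ [[rec] ++ st.1.reverse])
        else (st.1 ++ [rec], st.2)) ([], []) with ⟨o, rg⟩
  cases o <;> simp

-- ===== VERDICT (by name: the statement is the Claim_ definition above) =====
theorem group_paragraphs_py_spec : Claim_equal_group_paragraphs_py := by
  intro records _ _
  unfold Spec_group_paragraphs_py group_paragraphs_py group_paragraphs_py_alt
  by_cases hnil : records = []
  · simp [hnil]
  · simp only [hnil, if_false]
    rw [pv_minfold records]
    rcases hlev : (records.filter (fun rec => pvTag rec == some 66)).map pvLvl with _ | ⟨l0, lt⟩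
    · simp [PySem.List.min?]
    · rw [PySem.List.min?_id_cons]
      exact pv_main (fun rec => pvTag rec == some 66 && pvLvl rec == lt.foldl min l0) records
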